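-- pv_equiv track=rewrite | github.com/6788766/Planner | task_helper/travel/template.py | _assign_city_schedule
-- ===== SOURCE A (Python) =====
-- from typing import Dict, List, Optional, Sequence, Tuple
--
-- def _assign_city_schedule(days: int, city_slots: Sequence[str]) -> List[str]:
--     if not days:
--         return []
--     if not city_slots:
--         city_slots = ("CITY_1",)
--
--     segments = len(city_slots)
--     base = days // segments
--     remainder = days % segments
--
--     schedule: List[str] = []
--     day_pointer = 0
--     for idx, slot in enumerate(city_slots):
--         span = base + (1 if idx < remainder else 0)
--         if span == 0:
--             span = 1  # ensure coverage
--         for _ in range(span):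
--             if day_pointer < days:
--                 schedule.append(slot)
--                 day_pointer += 1
--
--     # If rounding produced fewer entries than days, pad with last slot.
--     while len(schedule) < days:
--         schedule.append(schedule[-1])
--     return schedule
-- ===== SOURCE B (Python) =====
-- from typing import List, Sequence
--
-- def _assign_city_schedule(days: int, city_slots: Sequence[str]) -> List[str]:
--     if days <= 0:
--         return []
--     slots = list(city_slots) if city_slots else ["CITY_1"]
--     segments = len(slots)
--     base, remainder = divmod(days, segments)
--     cut = remainder * (base + 1)
--     return [
--         slots[d // (base + 1) if d < cut else remainder + (d - cut) // base]
--         for d in range(days)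
--     ]
-- ===== Notes on version B (the rewrite author's own statement) =====
-- stated objective: simpler
-- what changed: Replaces the per-slot expansion loop with day-pointer truncation and pad-with-last while-loop by a single comprehension over the days that computes each day's owning slot index in closed form from base, remainder and cut = remainder*(base+1).
import Mathlib
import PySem

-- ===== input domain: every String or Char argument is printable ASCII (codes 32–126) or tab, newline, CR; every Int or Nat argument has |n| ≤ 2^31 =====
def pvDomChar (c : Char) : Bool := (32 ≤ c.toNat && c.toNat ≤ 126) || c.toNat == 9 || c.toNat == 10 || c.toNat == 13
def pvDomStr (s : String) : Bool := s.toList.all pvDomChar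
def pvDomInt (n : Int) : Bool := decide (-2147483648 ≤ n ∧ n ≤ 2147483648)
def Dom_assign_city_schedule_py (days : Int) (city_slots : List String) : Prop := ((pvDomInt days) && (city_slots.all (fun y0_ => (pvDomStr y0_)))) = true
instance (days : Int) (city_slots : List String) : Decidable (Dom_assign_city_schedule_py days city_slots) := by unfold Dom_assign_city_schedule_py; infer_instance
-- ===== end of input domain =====

-- B replaces A's per-slot expansion (with day-pointer truncation and pad-while loop) by one pass
-- over the days with a closed-form owning-slot index; objective: simpler.

-- ===== PORT A =====
-- inner 'for _ in range(span)' body of A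
def pvInnerStep (days : Int) (slot : String) (st : List String × Int) (_ : Int) : List String × Int :=
  if st.2 < days then (st.1 ++ [slot], st.2 + 1) else st

-- outer 'for idx, slot in enumerate(city_slots)' body of A
def pvOuterStep (days B R : Int) (st : List String × Int) (p : Int × String) : List String × Int :=
  let span := B + (if p.1 < R then (1:Int) else 0)
  let span := if span = 0 then 1 else span  -- ensure coverage
  (PySem.List.pyRange 0 span 1).foldl (pvInnerStep days p.2) st

-- A's trailing 'while len(schedule) < days: schedule.append(schedule[-1])'.  Fuel days.toNat bounds
-- the iteration count (each pass grows the list by one).  The 'none' branch is where Python would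
-- raise IndexError on schedule[-1]; it is unreachable: the loop body only runs with a non-empty schedule.
def pvPadA (days : Int) : Nat → List String → List String
  | 0, sched => sched
  | fuel+1, sched =>
    if (sched.length : Int) < days then
      match PySem.List.pyGet? sched (-1) with
      | some x => pvPadA days fuel (sched ++ [x])
      | none => sched
    else sched

def assign_city_schedule_py (days : Int) (city_slots : List String) : List String :=
  if days = 0 then []
  else
    let slots := if city_slots.isEmpty then ["CITY_1"] else city_slots
    let segments : Int := (slots.length : Int)
    let base := PySem.Int.floordiv days segments
    let remainder := PySem.Int.mod days segments
    let st := (PySem.List.enumerate slots).foldl (pvOuterStep days base remainder) (([] : List String), (0:Int))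
    pvPadA days days.toNat st.1

-- ===== PORT B =====
def assign_city_schedule_py_alt (days : Int) (city_slots : List String) : List String :=
  if days ≤ 0 then []
  else
    let slots := if city_slots.isEmpty then ["CITY_1"] else city_slots
    let segments : Int := (slots.length : Int)
    let base := PySem.Int.floordiv days segments
    let remainder := PySem.Int.mod days segments
    let cut := remainder * (base + 1)
    (PySem.List.pyRange 0 days 1).map (fun d =>
      let idx := if d < cut then PySem.Int.floordiv d (base + 1)
                 else remainder + PySem.Int.floordiv (d - cut) base
      -- slots[idx]: idx is always in range here (0 ≤ idx < len(slots)), so the default is never used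
      PySem.List.pyGetD slots idx "")

-- ===== PRECONDITION & SPEC =====
def Spec_assign_city_schedule_py (days : Int) (city_slots : List String) (out : List String) : Prop := out = assign_city_schedule_py_alt days city_slots
instance (days : Int) (city_slots : List String) (out : List String) : Decidable (Spec_assign_city_schedule_py days city_slots out) := by unfold Spec_assign_city_schedule_py; infer_instance

-- ===== CLAIM (what is proved, stated in full; the proofs are below) =====
def Claim_equal_assign_city_schedule_py : Prop := ∀ (days : Int) (city_slots : List String), Dom_assign_city_schedule_py days city_slots → Spec_assign_city_schedule_py days city_slots (assign_city_schedule_py days city_slots)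

-- ===== LEMMAS AND PROOFS =====

-- b = days // segments, r = days % segments (as Nats); pvOwnIdx is B's closed-form owning-slot index
def pvOwnIdx (b r d : Nat) : Nat := if d < r * (b + 1) then d / (b + 1) else r + (d - r * (b + 1)) / b

def pvG (slots : List String) (b r d : Nat) : String := slots.getD (pvOwnIdx b r d) ""

-- pvSpanN i = the (corrected) span A gives slot i;  pvT i = total span of slots 0..i-1
def pvSpanN (b r i : Nat) : Nat := if b = 0 then 1 else b + (if i < r then 1 else 0)

def pvT (b r i : Nat) : Nat := if b = 0 then i else i * b + min i r

theorem pvT_succ (b r i : Nat) : pvT b r (i+1) = pvT b r i + pvSpanN b r i := by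
  unfold pvT pvSpanN
  rcases Nat.eq_zero_or_pos b with h | h
  · simp [h]
  · have hb : b ≠ 0 := Nat.pos_iff_ne_zero.mp h
    rw [if_neg hb, if_neg hb, if_neg hb]
    rcases Nat.lt_or_ge i r with hir | hir
    · rw [if_pos hir, Nat.min_eq_left (Nat.le_of_lt hir), Nat.min_eq_left (Nat.succ_le_of_lt hir),
        Nat.succ_mul]
      omega
    · rw [if_neg (Nat.not_lt.mpr hir), Nat.min_eq_right hir, Nat.min_eq_right (Nat.le_succ_of_le hir),
        Nat.succ_mul]
      omega

theorem pvT_final (n s b r : Nat) (hs : 0 < s) (hb : b = n / s) (hr : r = n % s) :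
    n ≤ pvT b r s := by
  rcases Nat.eq_zero_or_pos b with h | h
  · have hT : pvT b r s = s := by unfold pvT; simp [h]
    rw [hT]
    have hlt : n < s := by
      by_contra hge
      have := Nat.div_pos (Nat.not_lt.mp hge) hs
      omega
    omega
  · have hbne : b ≠ 0 := Nat.pos_iff_ne_zero.mp h
    have hT : pvT b r s = s * b + min s r := by unfold pvT; simp [hbne]
    rw [hT]
    have hmod := Nat.div_add_mod n s
    have hrlt : r < s := hr ▸ Nat.mod_lt n hs
    rw [Nat.min_eq_right (Nat.le_of_lt hrlt)]
    have : s * b = s * (n / s) := by rw [hb]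
    omega

theorem pvOwn_eq (n s b r i d : Nat) (hs : 0 < s) (hb : b = n / s) (hr : r = n % s)
    (_hi : i < s) (h1 : pvT b r i ≤ d) (h2 : d < pvT b r (i+1)) (hd : d < n) :
    pvOwnIdx b r d = i := by
  unfold pvOwnIdx
  rcases Nat.eq_zero_or_pos b with h0 | h0
  · -- base = 0 : n < s, r = n, cut = n, day d owns slot d itself
    subst h0
    have hlt : n < s := by
      by_contra hge
      have := Nat.div_pos (Nat.not_lt.mp hge) hs
      omega
    have hrn : r = n := by rw [hr, Nat.mod_eq_of_lt hlt]
    have hTi : pvT 0 r i = i := by unfold pvT; simp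
    have hTi1 : pvT 0 r (i+1) = i + 1 := by unfold pvT; simp
    rw [hTi] at h1; rw [hTi1] at h2
    have hcut : d < r * (0 + 1) := by omega
    rw [if_pos hcut]
    omega
  · have hbne : b ≠ 0 := Nat.pos_iff_ne_zero.mp h0
    have hTi : pvT b r i = i * b + min i r := by unfold pvT; simp [hbne]
    have hTi1 : pvT b r (i+1) = (i+1) * b + min (i+1) r := by unfold pvT; simp [hbne]
    rw [hTi] at h1; rw [hTi1] at h2
    rcases Nat.lt_or_ge i r with hir | hir
    · -- i < r : inside the cut, d / (b+1) = i
      rw [Nat.min_eq_left (Nat.le_of_lt hir)] at h1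
      rw [Nat.min_eq_left (Nat.succ_le_of_lt hir)] at h2
      have hlo : i * (b + 1) ≤ d := by have := Nat.mul_succ i b; omega
      have hhi : d < (i + 1) * (b + 1) := by
        have := Nat.succ_mul i b; have := Nat.mul_succ (i+1) b; omega
      have hcut : d < r * (b + 1) := by
        calc d < (i + 1) * (b + 1) := hhi
          _ ≤ r * (b + 1) := Nat.mul_le_mul_right _ (Nat.succ_le_of_lt hir)
      rw [if_pos hcut]
      exact Nat.div_eq_of_lt_le hlo hhi
    · -- i ≥ r : past the cut, (d - cut) / b = i - r
      rw [Nat.min_eq_right hir] at h1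
      rw [Nat.min_eq_right (Nat.le_succ_of_le hir)] at h2
      have hrb : r * (b + 1) = r * b + r := by rw [Nat.mul_succ]
      have hrb' : r * b ≤ i * b := Nat.mul_le_mul_right b hir
      have hcutle : r * (b + 1) ≤ d := by omega
      rw [if_neg (Nat.not_lt.mpr hcutle)]
      have e2 : (i - r) * b = i * b - r * b := Nat.sub_mul _ _ _
      have e1 : (i - r + 1) * b = (i - r) * b + b := Nat.succ_mul _ _
      have e3 : (i + 1) * b = i * b + b := Nat.succ_mul _ _
      have hlo : (i - r) * b ≤ d - r * (b + 1) := by omega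
      have hhi : d - r * (b + 1) < (i - r + 1) * b := by omega
      rw [Nat.div_eq_of_lt_le hlo hhi]
      omega

-- the inner 'for _ in range(span)' loop appends min(span, days - len) copies of slot
theorem pvInner_fold (n : Nat) (slot : String) (l : List Int) :
    ∀ (sched : List String), sched.length ≤ n →
    l.foldl (pvInnerStep (n : Int) slot) (sched, (sched.length : Int)) =
      (sched ++ List.replicate (min l.length (n - sched.length)) slot,
       ((min (sched.length + l.length) n : Nat) : Int)) := by
  induction l with
  | nil => intro sched h; simp [Nat.min_eq_left h]
  | cons x l ih =>
    intro sched h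
    rw [List.foldl_cons]
    rcases Nat.lt_or_ge sched.length n with hlt | hge
    · have hstep : pvInnerStep (n:Int) slot (sched, (sched.length:Int)) x
          = (sched ++ [slot], (((sched.length + 1 : Nat)) : Int)) := by
        unfold pvInnerStep
        have hc : ((sched.length : Int)) < (n : Int) := by exact_mod_cast hlt
        simp [hc]
      rw [hstep]
      have hI := ih (sched ++ [slot]) (by simp; omega)
      rw [show (sched ++ [slot]).length = sched.length + 1 from by simp] at hI
      rw [hI]
      simp only [Prod.mk.injEq]
      refine ⟨?_, ?_⟩
      · rw [List.append_assoc, List.singleton_append, List.length_cons]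
        have hmin : min (l.length + 1) (n - sched.length)
            = min l.length (n - (sched.length + 1)) + 1 := by omega
        rw [hmin, List.replicate_succ]
      · rw [List.length_cons]; congr 1; omega
    · have hstep : pvInnerStep (n:Int) slot (sched, (sched.length:Int)) x
          = (sched, (sched.length : Int)) := by
        unfold pvInnerStep
        have hc : ¬ ((sched.length : Int)) < (n : Int) := by exact_mod_cast Nat.not_lt.mpr hge
        simp [hc]
      rw [hstep, ih sched h]
      simp only [Prod.mk.injEq, List.length_cons]
      have hn0 : sched.length = n := le_antisymm h hge
      refine ⟨?_, ?_⟩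
      · have : min l.length (n - sched.length) = min (l.length + 1) (n - sched.length) := by omega
        rw [this]
      · congr 1; omega

-- the outer loop: starting at slot i with the first min(n, T i) days already scheduled,
-- it finishes with exactly the n scheduled days, each mapped through B's closed-form owner
theorem pvOuter_fold (n : Nat) (_hn : 0 < n) (slots : List String) (s b r : Nat)
    (hs : s = slots.length) (hs0 : 0 < s) (hb : b = n / s) (hr : r = n % s) :
    ∀ (rest : List String) (i : Nat), slots.drop i = rest → i + rest.length = s →
    (PySem.List.enumerate rest (i : Int)).foldl (pvOuterStep (n : Int) (b : Int) (r : Int))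
        ((List.range (min n (pvT b r i))).map (pvG slots b r), ((min n (pvT b r i) : Nat) : Int)) =
      ((List.range n).map (pvG slots b r), (n : Int)) := by
  intro rest
  induction rest with
  | nil =>
    intro i hdrop hlen
    simp only [List.length_nil, Nat.add_zero] at hlen
    subst hlen
    have hfin : min n (pvT b r i) = n := Nat.min_eq_left (pvT_final n i b r hs0 hb hr)
    simp [PySem.List.enumerate_nil, hfin]
  | cons x rest ih =>
    intro i hdrop hlen
    rw [PySem.List.enumerate_cons, List.foldl_cons]
    have hi : i < s := by simp at hlen; omega
    have hspan : pvOuterStep (n : Int) (b : Int) (r : Int)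
        ((List.range (min n (pvT b r i))).map (pvG slots b r), ((min n (pvT b r i) : Nat) : Int))
        ((i : Int), x)
        = ((List.range (min n (pvT b r (i+1)))).map (pvG slots b r),
           ((min n (pvT b r (i+1)) : Nat) : Int)) := by
      unfold pvOuterStep
      dsimp only
      have hspanN : (if ((b : Int) + (if (i:Int) < (r:Int) then (1:Int) else 0)) = 0 then (1:Int)
          else ((b : Int) + (if (i:Int) < (r:Int) then (1:Int) else 0))) = ((pvSpanN b r i : Nat) : Int) := by
        unfold pvSpanN
        rcases Nat.lt_or_ge i r with hir | hir
        · rw [if_pos (show (i:Int) < (r:Int) from by exact_mod_cast hir)]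
          rw [if_neg (show (b:Int) + 1 ≠ 0 from by positivity)]
          rcases Nat.eq_zero_or_pos b with h0 | h0
          · subst h0; simp
          · rw [if_neg (Nat.pos_iff_ne_zero.mp h0), if_pos hir]; push_cast; ring
        · rw [if_neg (show ¬ (i:Int) < (r:Int) from by exact_mod_cast Nat.not_lt.mpr hir)]
          rcases Nat.eq_zero_or_pos b with h0 | h0
          · subst h0; norm_num
          · rw [if_neg (show (b:Int) + 0 ≠ 0 from by
                have : (0:Int) < (b:Int) := by exact_mod_cast h0
                omega)]
            rw [if_neg (Nat.pos_iff_ne_zero.mp h0), if_neg (Nat.not_lt.mpr hir)]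
            push_cast; ring
      rw [hspanN]
      set M := min n (pvT b r i) with hM
      have hMlen : ((List.range M).map (pvG slots b r)).length = M := by simp
      have hMle : M ≤ n := Nat.min_le_left _ _
      have hIF := pvInner_fold n x (PySem.List.pyRange 0 ((pvSpanN b r i : Nat) : Int) 1)
        ((List.range M).map (pvG slots b r)) (by rw [hMlen]; exact hMle)
      rw [hMlen] at hIF
      rw [hIF]
      have hlenr : (PySem.List.pyRange 0 ((pvSpanN b r i : Nat) : Int) 1).length = pvSpanN b r i := by
        rw [PySem.List.length_pyRange_one]; simp
      rw [hlenr]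
      simp only [Prod.mk.injEq]
      have hTs := pvT_succ b r i
      refine ⟨?_, ?_⟩
      · have hc : min (pvSpanN b r i) (n - M) = min n (pvT b r (i+1)) - M := by omega
        rw [hc]
        set M' := min n (pvT b r (i+1)) with hM'
        have hMM' : M ≤ M' := by omega
        have hsplit : List.range M' = List.range M ++ List.range' M (M' - M) := by
          rw [show M' = M + (M' - M) from by omega, List.range_eq_range', List.range_eq_range',
            ← List.range'_append_1]
          simp
        rw [hsplit, List.map_append]
        congr 1
        symm
        have hx : x = slots.getD i "" := by
          have hget : slots[i]? = some x := by
            have := congrArg List.head? hdrop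
            rw [List.head?_drop] at this
            simpa using this
          simp [List.getD, hget]
        have hconst : ∀ d ∈ List.range' M (M' - M), pvG slots b r d = x := by
          intro d hd
          rw [List.mem_range'_1] at hd
          unfold pvG
          rw [pvOwn_eq n s b r i d hs0 hb hr hi (by omega) (by omega) (by omega), hx]
        rw [List.map_congr_left hconst, List.map_const']
        simp
      · congr 1; omega
    rw [hspan]
    rw [show ((i:Int) + 1) = ((i+1 : Nat) : Int) from by push_cast; ring]
    refine ih (i+1) ?_ (by simp at hlen ⊢; omega)
    rw [← List.tail_drop, hdrop]
    rfl

-- the pad loop exits immediately once the schedule already has ≥ days entries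
theorem pvPadA_done (days : Int) (fuel : Nat) (sched : List String)
    (h : ¬ (sched.length : Int) < days) : pvPadA days fuel sched = sched := by
  cases fuel with
  | zero => rfl
  | succ m => unfold pvPadA; rw [if_neg h]

-- for days < 0 every loop body is a no-op
theorem pvFold_neg (days : Int) (hneg : days < 0) (B R : Int) (l : List (Int × String)) :
    l.foldl (pvOuterStep days B R) (([] : List String), (0:Int)) = (([] : List String), (0:Int)) := by
  apply List.foldl_fixed'
  intro p
  unfold pvOuterStep
  dsimp only
  apply List.foldl_fixed'
  intro x
  unfold pvInnerStep
  rw [if_neg (by omega)]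

-- main equivalence for positive days: both sides equal (range n).map (pvG slots b r)
theorem pvMain_pos (n : Nat) (hn : 0 < n) (slots : List String) (hne : slots ≠ []) :
    assign_city_schedule_py (n : Int) slots = assign_city_schedule_py_alt (n : Int) slots := by
  have hnz : (n : Int) ≠ 0 := by exact_mod_cast Nat.pos_iff_ne_zero.mp hn
  have hsle : ¬ (n : Int) ≤ 0 := by exact_mod_cast Nat.not_le.mpr hn
  have hempty : slots.isEmpty = false := by simp [hne]
  have hs0 : 0 < slots.length := List.length_pos_iff.mpr hne
  unfold assign_city_schedule_py assign_city_schedule_py_alt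
  rw [if_neg hnz, if_neg hsle]
  simp only [hempty, Bool.false_eq_true, if_false, PySem.Int.floordiv_natCast,
    PySem.Int.mod_natCast, Int.toNat_natCast]
  -- abbreviations
  set s := slots.length with hs
  set b := n / s with hb
  set r := n % s with hr
  -- A side reduces to the closed-form map
  have hA := pvOuter_fold n hn slots s b r hs hs0 hb hr slots 0 (by simp) (by simp [hs])
  have hT0 : pvT b r 0 = 0 := by unfold pvT; simp
  rw [hT0] at hA
  simp only [Nat.min_zero, List.range_zero, List.map_nil, Nat.cast_zero] at hA
  rw [hA]
  rw [pvPadA_done _ _ _ (by simp)]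
  -- B side is the same map, written over Int
  rw [PySem.List.pyRange_zero_natCast n, List.map_map]
  apply List.map_congr_left
  intro k hk
  rw [List.mem_range] at hk
  simp only [Function.comp]
  unfold pvG pvOwnIdx
  have hcut : (r : Int) * ((b : Int) + 1) = ((r * (b+1) : Nat) : Int) := by push_cast; ring
  rcases Nat.lt_or_ge k (r * (b+1)) with hklt | hkge
  · rw [if_pos hklt]
    rw [if_pos (show (k:Int) < (r:Int) * ((b:Int)+1) from by rw [hcut]; exact_mod_cast hklt)]
    rw [show ((b:Int)+1) = ((b+1 : Nat) : Int) from by push_cast; ring]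
    rw [PySem.Int.floordiv_natCast, PySem.List.pyGetD_natCast]
  · rw [if_neg (Nat.not_lt.mpr hkge)]
    rw [if_neg (show ¬ (k:Int) < (r:Int) * ((b:Int)+1) from by
      rw [hcut]; exact_mod_cast Nat.not_lt.mpr hkge)]
    rw [show (k : Int) - ((r : Int) * ((b : Int) + 1)) = ((k - r * (b+1) : Nat) : Int) from by
      rw [hcut]; omega]
    rw [PySem.Int.floordiv_natCast]
    rw [show (r : Int) + (((k - r * (b+1)) / b : Nat) : Int) = ((r + (k - r * (b+1)) / b : Nat) : Int) from by
      push_cast; ring]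
    rw [PySem.List.pyGetD_natCast]

-- ===== VERDICT (by name: the statement is the Claim_ definition above) =====
theorem assign_city_schedule_py_spec : Claim_equal_assign_city_schedule_py := by
  intro days city_slots _
  unfold Spec_assign_city_schedule_py
  rcases lt_trichotomy days 0 with hneg | hzero | hpos
  · -- days < 0 : both return []
    have hB : assign_city_schedule_py_alt days city_slots = [] := by
      unfold assign_city_schedule_py_alt
      rw [if_pos (le_of_lt hneg)]
    have hA : assign_city_schedule_py days city_slots = [] := by
      unfold assign_city_schedule_py
      rw [if_neg (by omega)]
      dsimp only
      rw [pvFold_neg days hneg]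
      rw [show days.toNat = 0 from Int.toNat_of_nonpos (le_of_lt hneg)]
      rfl
    rw [hA, hB]
  · subst hzero
    rfl
  · rw [show days = ((days.toNat : Nat) : Int) from by omega]
    by_cases hnil : city_slots = []
    · subst hnil
      -- empty city_slots : both replace it with ["CITY_1"]; reduce to the nonempty case
      have hA : assign_city_schedule_py ((days.toNat : Nat) : Int) [] =
          assign_city_schedule_py ((days.toNat : Nat) : Int) ["CITY_1"] := by
        unfold assign_city_schedule_py; rfl
      have hB : assign_city_schedule_py_alt ((days.toNat : Nat) : Int) [] =
          assign_city_schedule_py_alt ((days.toNat : Nat) : Int) ["CITY_1"] := by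
        unfold assign_city_schedule_py_alt; rfl
      rw [hA, hB]
      exact pvMain_pos days.toNat (by omega) ["CITY_1"] (by simp)
    · exact pvMain_pos days.toNat (by omega) city_slots hnil
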